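-- pv_equiv track=rewrite | github.com/Shirleyxxy/lc-python-algorithms | medium/permutations.py | permutationShifts
-- ===== SOURCE A (Python) =====
-- def permutationShifts(w):
--     res = []
--     d = {}
--     for i, ch in enumerate(w):
--         d[ch] = i
--
--     def backtracking(perm):
--         if len(perm) == len(w):
--             perm_shift = ''
--             for i, ch in enumerate(perm):
--                 perm_shift += str(i - d[ch]) + ch
--             res.append(perm_shift)
--             return
--         else:
--             for ch in w:
--                 if ch not in perm:
--                     backtracking(perm + ch)
--
--     backtracking('')
--     return sorted(res)
-- ===== SOURCE B (Python) =====
-- def _perms(pool, r):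
--     # all r-length permutations of the elements of pool, in index order
--     # (same order as itertools.permutations(pool, r))
--     if r == 0:
--         return [()]
--     out = []
--     for i in range(len(pool)):
--         for rest in _perms(pool[:i] + pool[i + 1:], r - 1):
--             out.append((pool[i],) + rest)
--     return out
--
--
-- def permutationShifts(w):
--     d = {ch: i for i, ch in enumerate(w)}
--     pool = list(dict.fromkeys(w))
--     res = [''.join(str(i - d[ch]) + ch for i, ch in enumerate(p))
--            for p in _perms(pool, len(w))]
--     return sorted(res)
-- ===== Notes on version B (the rewrite author's own statement) =====
-- stated objective: alternative
-- what changed: A's recursive backtracking (mutating a shared res list, filtering already-used characters with an inner membership scan and building each shift-string by string +=) is replaced by a flat enumeration: dedup the characters once, generate all len(w)-permutations of that pool by index-order selection, and render each with a join over a comprehension; duplicate letters then yield [] and the empty string yields [''] for free, exactly as in A.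
import Mathlib
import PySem

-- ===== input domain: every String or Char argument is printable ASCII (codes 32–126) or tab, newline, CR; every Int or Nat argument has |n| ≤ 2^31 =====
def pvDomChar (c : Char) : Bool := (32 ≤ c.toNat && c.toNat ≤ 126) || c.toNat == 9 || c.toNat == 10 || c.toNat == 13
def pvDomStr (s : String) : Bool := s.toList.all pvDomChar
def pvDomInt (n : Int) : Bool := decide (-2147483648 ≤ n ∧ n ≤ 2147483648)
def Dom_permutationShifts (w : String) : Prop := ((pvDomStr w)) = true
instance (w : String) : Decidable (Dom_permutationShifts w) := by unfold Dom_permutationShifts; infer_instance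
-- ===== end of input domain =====

-- B replaces A's recursive backtracking accumulator with a flat enumeration of the
-- r-permutations of the deduplicated character pool (alternative decomposition, same cost).

-- ===== PORT A =====
-- d = {}; for i, ch in enumerate(w): d[ch] = i   (shared by both Pythons verbatim)
def pvMkD (wl : List Char) : PySem.Dict Char Int :=
  (PySem.List.enumerate wl).foldl (fun d p => d.insert p.2 p.1) PySem.Dict.empty

-- perm_shift = ''; for i, ch in enumerate(perm): perm_shift += str(i - d[ch]) + ch
-- d[ch] is always present for ch drawn from w; `(get? …).getD 0` totalises that lookup.
def pvShiftA (d : PySem.Dict Char Int) (perm : List Char) : List Char :=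
  (PySem.List.enumerate perm).foldl
    (fun acc p => acc ++ PySem.Int.toChars (p.1 - ((d.get? p.2).getD 0)) ++ [p.2]) []

-- def backtracking(perm): …  (fuel = len(w) - len(perm) is only a termination measure;
-- the fuel-0 fallthrough is unreachable on every call the ports make)
def pvBt (wl : List Char) (d : PySem.Dict Char Int) (fuel : Nat) (perm : List Char)
    (res : List String) : List String :=
  if perm.length = wl.length then res ++ [String.mk (pvShiftA d perm)]
  else match fuel with
    | 0 => res
    | f + 1 => wl.foldl (fun r ch => if ch ∈ perm then r else pvBt wl d f (perm ++ [ch]) r) res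
termination_by fuel

def permutationShifts (w : String) : List String :=
  let wl := w.toList
  let d := pvMkD wl
  let res := pvBt wl d wl.length [] []
  PySem.List.sorted res (fun x => x) false

-- ===== PORT B =====
-- ''.join(str(i - d[ch]) + ch for i, ch in enumerate(p))
def pvShiftB (d : PySem.Dict Char Int) (p : List Char) : List Char :=
  ((PySem.List.enumerate p).map
    (fun q : Int × Char => PySem.Int.toChars (q.1 - ((d.get? q.2).getD 0)) ++ [q.2])).flatten

-- pool = list(dict.fromkeys(w)); res = [… for p in _perms(pool, len(w))]; sorted(res)
-- (_perms in Source B is index-order r-permutations = PySem.List.permutations, step for step)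
def permutationShifts_alt (w : String) : List String :=
  let wl := w.toList
  let d := pvMkD wl
  let pool := PySem.List.dedup wl
  let res := (PySem.List.permutations pool wl.length).map (fun p => String.mk (pvShiftB d p))
  PySem.List.sorted res (fun x => x) false

-- ===== PRECONDITION & SPEC =====
def Spec_permutationShifts (w : String) (out : List String) : Prop := out = permutationShifts_alt w
instance (w : String) (out : List String) : Decidable (Spec_permutationShifts w out) := by unfold Spec_permutationShifts; infer_instance

-- ===== CLAIM (what is proved, stated in full; the proofs are below) =====
def Claim_equal_permutationShifts : Prop := ∀ (w : String), Dom_permutationShifts w → Spec_permutationShifts w (permutationShifts w)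

-- ===== LEMMAS AND PROOFS =====

-- the two renderings of one permutation's shift-string coincide
theorem pvShift_eq (d : PySem.Dict Char Int) (p : List Char) : pvShiftA d p = pvShiftB d p := by
  unfold pvShiftA pvShiftB
  rw [show (fun (acc : List Char) (p : Int × Char) =>
        acc ++ PySem.Int.toChars (p.1 - ((d.get? p.2).getD 0)) ++ [p.2])
      = (fun acc p => acc ++ (PySem.Int.toChars (p.1 - ((d.get? p.2).getD 0)) ++ [p.2]))
      from by funext acc p; simp,
    PySem.List.foldl_append_eq_flatMap, List.nil_append, List.flatMap_def]

-- proof-side pure generator of A's backtracking (res-free)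
def pvG (wl : List Char) (d : PySem.Dict Char Int) (fuel : Nat) (perm : List Char) : List String :=
  if perm.length = wl.length then [String.mk (pvShiftA d perm)]
  else match fuel with
    | 0 => []
    | f + 1 => wl.flatMap (fun ch => if ch ∈ perm then [] else pvG wl d f (perm ++ [ch]))
termination_by fuel

theorem pvBt_eq_pvG (wl : List Char) (d : PySem.Dict Char Int) :
    ∀ (fuel : Nat) (perm : List Char) (res : List String),
      pvBt wl d fuel perm res = res ++ pvG wl d fuel perm := by
  intro fuel
  induction fuel with
  | zero =>
    intro perm res
    by_cases h : perm.length = wl.length <;> simp [pvBt, pvG, h]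
  | succ f ih =>
    intro perm res
    by_cases h : perm.length = wl.length
    · simp [pvBt, pvG, h]
    · rw [pvBt, pvG]
      simp only [if_neg h]
      rw [PySem.List.foldl_congr_mem wl _
            (fun r ch => r ++ (if ch ∈ perm then [] else pvG wl d f (perm ++ [ch]))) res
            (by intro acc x _; by_cases hc : x ∈ perm <;> simp [hc, ih]),
          PySem.List.foldl_append_eq_flatMap]

-- one unfolding of PySem.List.permutations at a successor depth
theorem pv_perms_succ (pool : List Char) (r : Nat) :
    PySem.List.permutations pool (r + 1)
      = (List.range pool.length).flatMap
          (fun i => match pool[i]? with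
            | none => []
            | some x => (PySem.List.permutations (pool.eraseIdx i) r).map (fun p => x :: p)) := by
  rw [PySem.List.permutations]
  apply List.flatMap_congr
  intro i _
  rcases pool[i]? with _ | x <;> rfl

theorem pv_perms_nil (r : Nat) :
    ∀ pool : List Char, pool.length < r → PySem.List.permutations pool r = [] := by
  induction r with
  | zero => intro pool h; exact absurd h (Nat.not_lt_zero _)
  | succ r ih =>
    intro pool h
    rw [pv_perms_succ]
    apply List.flatMap_eq_nil_iff.mpr
    intro i hi
    rw [List.mem_range] at hi
    rw [List.getElem?_eq_getElem hi]
    have : (pool.eraseIdx i).length < r := by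
      rw [List.length_eraseIdx_of_lt hi]; omega
    simp [ih _ this]

-- index-order traversal of a duplicate-free list equals element-order traversal
theorem pv_idxFlat : ∀ (xs : List Char) (K : Char → List Char → List (List Char)), xs.Nodup →
    (List.range xs.length).flatMap
        (fun i => match xs[i]? with | none => [] | some x => K x (xs.eraseIdx i))
      = xs.flatMap (fun x => K x (xs.erase x)) := by
  intro xs
  induction xs with
  | nil => intro K _; simp
  | cons x xs ih =>
    intro K hnd
    rw [List.length_cons, List.range_succ_eq_map, List.flatMap_cons, List.flatMap_map]
    simp only [List.getElem?_cons_zero, List.eraseIdx_cons_zero, List.getElem?_cons_succ,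
      List.eraseIdx_cons_succ, List.flatMap_cons, List.erase_cons_head]
    rw [ih (fun y l => K y (x :: l)) (List.nodup_cons.mp hnd).2]
    congr 1
    apply List.flatMap_congr
    intro y hy
    have hxy : ¬ (x == y) = true := by
      simp only [beq_iff_eq]
      rintro rfl
      exact (List.nodup_cons.mp hnd).1 hy
    rw [List.erase_cons_tail hxy]

theorem pv_perms_nodup (pool : List Char) (hnd : pool.Nodup) (r : Nat) :
    PySem.List.permutations pool (r + 1)
      = pool.flatMap (fun x => (PySem.List.permutations (pool.erase x) r).map (x :: ·)) := by
  rw [pv_perms_succ, pv_idxFlat pool (fun x l => (PySem.List.permutations l r).map (x :: ·)) hnd]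

theorem pv_flatMap_if (l perm : List Char) (F : Char → List String) :
    l.flatMap (fun x => if x ∈ perm then [] else F x)
      = (l.filter (fun c => decide (c ∉ perm))).flatMap F := by
  induction l with
  | nil => simp
  | cons x xs ih => by_cases hc : x ∈ perm <;> simp [hc, ih]

theorem pvG_nodup (wl : List Char) (d : PySem.Dict Char Int) (hw : wl.Nodup) :
    ∀ (fuel : Nat) (perm : List Char), perm.length + fuel = wl.length →
      pvG wl d fuel perm
        = (PySem.List.permutations (wl.filter (fun c => decide (c ∉ perm))) fuel).map
            (fun p => String.mk (pvShiftA d (perm ++ p))) := by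
  intro fuel
  induction fuel with
  | zero =>
    intro perm h
    have hl : perm.length = wl.length := by omega
    rw [pvG]
    simp only [if_pos hl]
    show _ = (PySem.List.permutations _ 0).map _
    rw [show PySem.List.permutations (wl.filter (fun c => decide (c ∉ perm))) 0 = [[]] from rfl]
    simp
  | succ f ih =>
    intro perm h
    have hne : ¬ perm.length = wl.length := by omega
    rw [pvG]
    simp only [if_neg hne]
    rw [pv_flatMap_if, pv_perms_nodup _ (hw.filter _) f, List.map_flatMap]
    apply List.flatMap_congr
    intro x hx
    have hxm := List.mem_filter.mp hx
    have hxp : x ∉ perm := by simpa using hxm.2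
    have hErase : (wl.filter (fun c => decide (c ∉ perm))).erase x
        = wl.filter (fun c => decide (c ∉ perm ++ [x])) := by
      rw [(hw.filter _).erase_eq_filter, List.filter_filter]
      apply List.filter_congr
      intro c _
      simp only [List.mem_append, List.mem_singleton]
      by_cases h1 : c ∈ perm <;> by_cases h2 : c = x <;> simp [h1, h2]
    rw [ih (perm ++ [x]) (by simp; omega), hErase, List.map_map]
    apply List.map_congr_left
    intro p _
    simp

theorem pvG_dup (wl : List Char) (d : PySem.Dict Char Int) (hw : ¬ wl.Nodup) :
    ∀ (fuel : Nat) (perm : List Char), perm.Nodup → perm ⊆ wl →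
      perm.length + fuel = wl.length → pvG wl d fuel perm = [] := by
  intro fuel
  induction fuel with
  | zero =>
    intro perm hnd hsub h
    have hlen : perm.length = wl.length := by omega
    exact absurd (((List.subperm_of_subset hnd hsub).perm_of_length_le
      (le_of_eq hlen.symm)).nodup hnd) hw
  | succ f ih =>
    intro perm hnd hsub h
    have hne : ¬ perm.length = wl.length := by omega
    rw [pvG]
    simp only [if_neg hne]
    apply List.flatMap_eq_nil_iff.mpr
    intro ch hch
    by_cases hc : ch ∈ perm
    · simp [hc]
    · simp only [if_neg hc]
      apply ih
      · simp only [List.nodup_append]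
        refine ⟨hnd, List.nodup_singleton _, ?_⟩
        intro a ha b hb
        rw [List.mem_singleton.mp hb]
        intro hax
        exact hc (hax ▸ ha)
      · intro y hy
        rcases List.mem_append.mp hy with hy | hy
        · exact hsub hy
        · rw [List.mem_singleton.mp hy]; exact hch
      · simp only [List.length_append, List.length_singleton]; omega

theorem pv_ofList_acc : ∀ (xs : List Char) (s : PySem.Set Char), xs.Nodup →
    (∀ x ∈ xs, x ∉ s) → xs.foldl PySem.Set.add s = s ++ xs := by
  intro xs
  induction xs with
  | nil => intro s _ _; simp
  | cons x xs ih =>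
    intro s hnd hfr
    rw [List.foldl_cons]
    have hadd : PySem.Set.add s x = s ++ [x] := by
      simp [PySem.Set.add, PySem.Set.contains]
      intro hmem
      exact absurd hmem (hfr x (List.mem_cons_self ..))
    rw [hadd, ih (s ++ [x]) (List.nodup_cons.mp hnd).2]
    · simp
    · intro y hy
      simp only [List.mem_append, List.mem_singleton]
      rintro (hys | rfl)
      · exact hfr y (List.mem_cons_of_mem _ hy) hys
      · exact (List.nodup_cons.mp hnd).1 hy

theorem pv_dedup_self (xs : List Char) (h : xs.Nodup) : PySem.List.dedup xs = xs := by
  rw [PySem.List.dedup_eq_ofList, PySem.Set.ofList_eq_foldl, pv_ofList_acc xs [] h (by simp)]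
  simp

theorem pv_dedup_perms_dup (wl : List Char) (hw : ¬ wl.Nodup) :
    PySem.List.permutations (PySem.List.dedup wl) wl.length = [] := by
  rw [PySem.List.dedup_eq_ofList]
  by_cases h : (PySem.Set.ofList wl).length < wl.length
  · exact pv_perms_nil _ _ h
  · exfalso
    have hsp : (PySem.Set.ofList wl).Subperm wl :=
      List.subperm_of_subset (PySem.Set.nodup_ofList wl)
        (fun y hy => (PySem.Set.mem_ofList wl y).mp hy)
    exact hw ((hsp.perm_of_length_le (by omega)).nodup (PySem.Set.nodup_ofList wl))

-- ===== VERDICT (by name: the statement is the Claim_ definition above) =====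
theorem permutationShifts_spec : Claim_equal_permutationShifts := by
  intro w _
  unfold Spec_permutationShifts permutationShifts permutationShifts_alt
  simp only []
  set wl := w.toList
  set d := pvMkD wl
  rw [pvBt_eq_pvG, List.nil_append]
  by_cases hnd : wl.Nodup
  · rw [pvG_nodup wl d hnd wl.length [] (by simp), pv_dedup_self wl hnd]
    simp [pvShift_eq]
  · rw [pvG_dup wl d hnd wl.length [] (by simp) (by simp) (by simp),
      pv_dedup_perms_dup wl hnd]
    simp
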